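-- pv_equiv track=rewrite | github.com/Sandeeppagi/PythonAlgo | DS/DynamicProgramming/Fibonacci/Number_factors.py | count_ways_bottom_up
-- ===== SOURCE A (Python) =====
-- def count_ways_bottom_up(n):
--     if n <= 2:
--         return 1
--     if n == 3:
--         return 2
--     dp = [0 for i in range(n + 1)]
--     dp[0], dp[1], dp[2], dp[3] = 1, 1, 1, 2
--     for i in range(4, n + 1):
--         dp[i] = dp[i - 1] + dp[i - 3] + dp[i - 4]
--     return dp[n]
-- ===== SOURCE B (Python) =====
-- def count_ways_bottom_up(n):
--     # O(log n) matrix exponentiation of the linear recurrence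
--     # f(i) = f(i-1) + f(i-3) + f(i-4), f(0..2) = 1, f(3) = 2.
--     if n <= 3:
--         return 2 if n == 3 else 1
--     def mul(A, B):
--         return tuple(tuple(sum(A[i][k] * B[k][j] for k in range(4))
--                            for j in range(4)) for i in range(4))
--     R = ((1, 0, 0, 0), (0, 1, 0, 0), (0, 0, 1, 0), (0, 0, 0, 1))
--     M = ((1, 0, 1, 1), (1, 0, 0, 0), (0, 1, 0, 0), (0, 0, 1, 0))
--     k = n - 3
--     while k:
--         if k & 1:
--             R = mul(R, M)
--         M = mul(M, M)
--         k >>= 1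
--     # answer = first component of R applied to the base state (f3, f2, f1, f0)
--     return 2 * R[0][0] + R[0][1] + R[0][2] + R[0][3]
-- ===== Notes on version B (the rewrite author's own statement) =====
-- stated objective: faster
-- what changed: Replaced the O(n) bottom-up dp table with O(log n) binary exponentiation of the 4x4 companion matrix of the recurrence f(i)=f(i-1)+f(i-3)+f(i-4), applied to the base state (2,1,1,1).
import Mathlib
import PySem

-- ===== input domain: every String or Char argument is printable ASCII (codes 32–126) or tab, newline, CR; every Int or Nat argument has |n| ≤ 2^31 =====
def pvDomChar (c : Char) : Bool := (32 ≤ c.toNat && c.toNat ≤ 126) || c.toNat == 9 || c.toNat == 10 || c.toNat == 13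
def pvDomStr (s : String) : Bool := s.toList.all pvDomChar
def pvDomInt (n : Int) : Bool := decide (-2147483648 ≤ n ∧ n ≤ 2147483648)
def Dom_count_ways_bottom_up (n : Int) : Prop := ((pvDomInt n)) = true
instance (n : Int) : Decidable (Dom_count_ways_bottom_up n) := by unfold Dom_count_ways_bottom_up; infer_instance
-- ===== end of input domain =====

-- B replaces A's O(n) dp-table loop by O(log n) binary exponentiation of the 4x4 companion
-- matrix of the recurrence f(i) = f(i-1) + f(i-3) + f(i-4); same return value on every int.

-- ===== PORT A =====
def count_ways_bottom_up (n : Int) : Int :=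
  if n ≤ 2 then 1
  else if n = 3 then 2
  else
    -- dp = [0 for i in range(n + 1)]   (the Python list carried as an Array)
    let dp : Array Int := ((PySem.List.pyRange 0 (n + 1) 1).map (fun _ => 0)).toArray
    -- dp[0], dp[1], dp[2], dp[3] = 1, 1, 1, 2   (indices provably in range: n ≥ 4 here,
    -- so setIfInBounds/getD below are exactly Python's dp[i] store/load)
    let dp := dp.setIfInBounds 0 1
    let dp := dp.setIfInBounds 1 1
    let dp := dp.setIfInBounds 2 1
    let dp := dp.setIfInBounds 3 2
    -- for i in range(4, n + 1): dp[i] = dp[i-1] + dp[i-3] + dp[i-4]   (all indices ≥ 0 and in range)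
    let dp := (PySem.List.pyRange 4 (n + 1) 1).foldl
      (fun dp i => dp.setIfInBounds i.toNat
        (dp.getD (i - 1).toNat 0 + dp.getD (i - 3).toNat 0 + dp.getD (i - 4).toNat 0)) dp
    dp.getD n.toNat 0

-- ===== PORT B =====
-- Source B's 4x4 tuple-of-tuples, ported as a 16-field structure
structure M4 where
  (a00 a01 a02 a03 a10 a11 a12 a13 a20 a21 a22 a23 a30 a31 a32 a33 : Int)
deriving DecidableEq, Repr

-- mul(A, B): entry (i,j) = sum over k of A[i][k]*B[k][j]
def pvMul (A B : M4) : M4 :=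
  ⟨A.a00*B.a00 + A.a01*B.a10 + A.a02*B.a20 + A.a03*B.a30,
   A.a00*B.a01 + A.a01*B.a11 + A.a02*B.a21 + A.a03*B.a31,
   A.a00*B.a02 + A.a01*B.a12 + A.a02*B.a22 + A.a03*B.a32,
   A.a00*B.a03 + A.a01*B.a13 + A.a02*B.a23 + A.a03*B.a33,
   A.a10*B.a00 + A.a11*B.a10 + A.a12*B.a20 + A.a13*B.a30,
   A.a10*B.a01 + A.a11*B.a11 + A.a12*B.a21 + A.a13*B.a31,
   A.a10*B.a02 + A.a11*B.a12 + A.a12*B.a22 + A.a13*B.a32,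
   A.a10*B.a03 + A.a11*B.a13 + A.a12*B.a23 + A.a13*B.a33,
   A.a20*B.a00 + A.a21*B.a10 + A.a22*B.a20 + A.a23*B.a30,
   A.a20*B.a01 + A.a21*B.a11 + A.a22*B.a21 + A.a23*B.a31,
   A.a20*B.a02 + A.a21*B.a12 + A.a22*B.a22 + A.a23*B.a32,
   A.a20*B.a03 + A.a21*B.a13 + A.a22*B.a23 + A.a23*B.a33,
   A.a30*B.a00 + A.a31*B.a10 + A.a32*B.a20 + A.a33*B.a30,
   A.a30*B.a01 + A.a31*B.a11 + A.a32*B.a21 + A.a33*B.a31,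
   A.a30*B.a02 + A.a31*B.a12 + A.a32*B.a22 + A.a33*B.a32,
   A.a30*B.a03 + A.a31*B.a13 + A.a32*B.a23 + A.a33*B.a33⟩

def pvI : M4 := ⟨1,0,0,0, 0,1,0,0, 0,0,1,0, 0,0,0,1⟩

def pvM : M4 := ⟨1,0,1,1, 1,0,0,0, 0,1,0,0, 0,0,1,0⟩

-- Source B's 'while k: if k & 1: R = mul(R, M); M = mul(M, M); k >>= 1',
-- the loop counter k = n - 3 > 0 carried as a Nat (k & 1 = k % 2, k >>= 1 = k / 2)
def pvPowLoop (R m : M4) (k : Nat) : M4 :=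
  if k = 0 then R
  else pvPowLoop (if k % 2 = 1 then pvMul R m else R) (pvMul m m) (k / 2)

def count_ways_bottom_up_alt (n : Int) : Int :=
  if n ≤ 3 then (if n = 3 then 2 else 1)
  else
    let R := pvPowLoop pvI pvM (n - 3).toNat
    -- sum(R[0][j] * v[j] for j in range(4)) with v = (2, 1, 1, 1)
    R.a00 * 2 + R.a01 * 1 + R.a02 * 1 + R.a03 * 1

-- ===== PRECONDITION & SPEC =====
def Spec_count_ways_bottom_up (n : Int) (out : Int) : Prop := out = count_ways_bottom_up_alt n
instance (n : Int) (out : Int) : Decidable (Spec_count_ways_bottom_up n out) := by unfold Spec_count_ways_bottom_up; infer_instance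

-- ===== CLAIM (what is proved, stated in full; the proofs are below) =====
def Claim_equal_count_ways_bottom_up : Prop := ∀ (n : Int), Dom_count_ways_bottom_up n → Spec_count_ways_bottom_up n (count_ways_bottom_up n)

-- ===== LEMMAS AND PROOFS =====

-- the common value: the sequence itself
def pvF : Nat → Int
  | 0 => 1
  | 1 => 1
  | 2 => 1
  | 3 => 2
  | k+4 => pvF (k+3) + pvF (k+1) + pvF k

-- ---- B side: binary exponentiation computes matrix powers, powers step pvF ----

theorem pvMul_assoc (a b c : M4) : pvMul (pvMul a b) c = pvMul a (pvMul b c) := by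
  cases a; cases b; cases c
  simp only [pvMul, M4.mk.injEq]
  and_intros <;> ring

theorem pvMul_I (a : M4) : pvMul a pvI = a := by
  cases a; simp [pvMul, pvI]

theorem pvI_mul (a : M4) : pvMul pvI a = a := by
  cases a; simp [pvMul, pvI]

def pvNpow (m : M4) : Nat → M4
  | 0 => pvI
  | k+1 => pvMul m (pvNpow m k)

theorem pvNpow_double (m : M4) (j : Nat) : pvNpow m (2*j) = pvNpow (pvMul m m) j := by
  induction j with
  | zero => rfl
  | succ j ih =>
    have h2 : 2 * (j+1) = (2*j) + 1 + 1 := by omega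
    rw [h2]
    simp only [pvNpow, ih, ← pvMul_assoc]

theorem pvPowLoop_eq (k : Nat) (R m : M4) : pvPowLoop R m k = pvMul R (pvNpow m k) := by
  induction k using Nat.strong_induction_on generalizing R m with
  | _ k ih =>
    rw [pvPowLoop]
    by_cases h0 : k = 0
    · simp [h0, pvNpow, pvMul_I]
    · rw [if_neg h0, ih (k/2) (by omega)]
      by_cases h1 : k % 2 = 1
      · rw [if_pos h1, pvMul_assoc, ← pvNpow_double]
        have hk : 2 * (k/2) + 1 = k := by omega
        rw [show pvMul m (pvNpow m (2*(k/2))) = pvNpow m (2*(k/2)+1) from rfl, hk]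
      · rw [if_neg h1, ← pvNpow_double]
        have hk : 2 * (k/2) = k := by omega
        rw [hk]

-- row-wise application of a matrix to the base state (f(3), f(2), f(1), f(0)) = (2,1,1,1)
def pvApp (R : M4) : Int × Int × Int × Int :=
  (2*R.a00 + R.a01 + R.a02 + R.a03,
   2*R.a10 + R.a11 + R.a12 + R.a13,
   2*R.a20 + R.a21 + R.a22 + R.a23,
   2*R.a30 + R.a31 + R.a32 + R.a33)

theorem pvApp_state (k : Nat) :
    pvApp (pvNpow pvM k) = (pvF (k+3), pvF (k+2), pvF (k+1), pvF k) := by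
  induction k with
  | zero => simp [pvApp, pvNpow, pvI, pvF]
  | succ k ih =>
    have hmul : ∀ P : M4, pvApp (pvMul pvM P) =
        ((pvApp P).1 + (pvApp P).2.2.1 + (pvApp P).2.2.2,
         (pvApp P).1, (pvApp P).2.1, (pvApp P).2.2.1) := by
      intro P; cases P; simp only [pvApp, pvMul, pvM, Prod.mk.injEq]; and_intros <;> ring
    rw [pvNpow, hmul, ih]
    have hr : pvF (k+1+3) = pvF (k+3) + pvF (k+1) + pvF k := by
      show pvF (k+4) = _; rw [pvF]
    simp [hr]

theorem pvB_val (n : Int) (hn : 4 ≤ n) : count_ways_bottom_up_alt n = pvF n.toNat := by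
  rw [count_ways_bottom_up_alt, if_neg (by omega)]
  have h1 : pvPowLoop pvI pvM (n-3).toNat = pvNpow pvM (n-3).toNat := by
    rw [pvPowLoop_eq, pvI_mul]
  have h2 := pvApp_state (n-3).toNat
  have h3 : (n-3).toNat + 3 = n.toNat := by omega
  rw [h3] at h2
  have h4 : (pvApp (pvNpow pvM (n-3).toNat)).1 = pvF n.toNat := by rw [h2]
  simp only [pvApp] at h4
  simp only [h1]
  linarith [h4]

-- ---- A side: the dp table holds pvF at every filled index ----

-- A's loop body on the list view of the array
def pvStep (dp : List Int) (i : Int) : List Int :=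
  PySem.List.pySetD dp i
    (PySem.List.pyGetD dp (i - 1) 0 + PySem.List.pyGetD dp (i - 3) 0 +
     PySem.List.pyGetD dp (i - 4) 0)

-- A's loop body as written in the port (array view)
def pvStepA (dp : Array Int) (i : Int) : Array Int :=
  dp.setIfInBounds i.toNat
    (dp.getD (i - 1).toNat 0 + dp.getD (i - 3).toNat 0 + dp.getD (i - 4).toNat 0)

theorem pvArr_getD (a : Array Int) (i : Nat) (d : Int) : a.getD i d = a.toList.getD i d := by
  simp [Array.getD, List.getD, Array.getElem?_toList]
  split_ifs with h
  · simp [Array.getElem?_eq_getElem h]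
  · rw [Array.getElem?_eq_none (by omega)]
    rfl

theorem pvStepA_toList (dp : Array Int) (i : Int) (h : 4 ≤ i) :
    (pvStepA dp i).toList = pvStep dp.toList i := by
  rw [pvStepA, pvStep,
    PySem.List.pyGetD_of_nonneg dp.toList 0 (show (0:Int) ≤ i - 1 from by omega),
    PySem.List.pyGetD_of_nonneg dp.toList 0 (show (0:Int) ≤ i - 3 from by omega),
    PySem.List.pyGetD_of_nonneg dp.toList 0 (show (0:Int) ≤ i - 4 from by omega),
    PySem.List.pySetD_of_nonneg dp.toList _ (by omega),
    Array.toList_setIfInBounds, pvArr_getD, pvArr_getD, pvArr_getD]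

theorem pvFold_toList (l : List Int) (dp : Array Int) (hl : ∀ i ∈ l, 4 ≤ i) :
    (l.foldl pvStepA dp).toList = l.foldl pvStep dp.toList := by
  induction l generalizing dp with
  | nil => rfl
  | cons x t ih =>
    rw [List.foldl_cons, List.foldl_cons, ih _ (fun i hi => hl i (List.mem_cons_of_mem _ hi)),
      pvStepA_toList _ _ (hl x List.mem_cons_self)]

-- the table right before the loop: n+1 zeros with dp[0..3] = 1,1,1,2
def pvInit (n : Int) : List Int :=
  ((((List.replicate (n+1).toNat (0:Int)).set 0 1).set 1 1).set 2 1).set 3 2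

theorem pvInit_eq (n : Int) :
    (((((((PySem.List.pyRange 0 (n+1) 1).map (fun _ => (0:Int))).toArray).setIfInBounds 0 1).setIfInBounds
      1 1).setIfInBounds 2 1).setIfInBounds 3 2).toList = pvInit n := by
  have h : (PySem.List.pyRange 0 (n+1) 1).map (fun _ => (0:Int)) = List.replicate (n+1).toNat 0 := by
    rw [PySem.List.pyRange_one, List.map_map]
    simp [Function.comp_def, List.map_const']
  simp only [Array.toList_setIfInBounds, h, pvInit]

theorem pvInv (n : Int) (hn : 4 ≤ n) (j : Nat) (h3 : 3 ≤ j) (hj : (j:Int) ≤ n) :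
    ((PySem.List.pyRange 4 ((j:Int)+1) 1).foldl pvStep (pvInit n)).length = (n+1).toNat ∧
    ∀ k : Nat, k ≤ j →
      ((PySem.List.pyRange 4 ((j:Int)+1) 1).foldl pvStep (pvInit n)).getD k 0 = pvF k := by
  induction j with
  | zero => omega
  | succ j ih =>
    by_cases hj3 : 3 ≤ j
    case neg =>
      have hj2 : j = 2 := by omega
      subst hj2
      rw [PySem.List.pyRange_one_eq_nil (by norm_num)]
      constructor
      · simp [pvInit]
      · intro k hk
        rw [List.foldl_nil]
        have hb : ∀ k : Nat, k ≤ 3 → (pvInit n).getD k 0 = [1,1,1,2].getD k 0 := by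
          intro k hk
          interval_cases k <;>
            simp [pvInit, List.getD, show (0:Int) ≤ n from by omega,
              show (0:Int) < n from by omega, show (2:Int) ≤ n from by omega,
              show (3:Int) ≤ n from by omega]
        rw [hb k hk]
        interval_cases k <;> rfl
    case pos =>
      have ⟨ihl, ihv⟩ := ih hj3 (by omega)
      have hsplit : PySem.List.pyRange 4 ((j:Int)+1+1) 1 =
          PySem.List.pyRange 4 ((j:Int)+1) 1 ++ [(j:Int)+1] :=
        PySem.List.pyRange_one_succ_right (by omega)
      rw [show ((j+1 : Nat):Int) = (j:Int)+1 from by omega, hsplit, List.foldl_append,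
        List.foldl_cons, List.foldl_nil]
      set dp := (PySem.List.pyRange 4 ((j:Int)+1) 1).foldl pvStep (pvInit n) with hdp
      have hstep : pvStep dp ((j:Int)+1) = dp.set (j+1) (pvF j + pvF (j-2) + pvF (j-3)) := by
        rw [pvStep]
        have e1 : (j:Int)+1-1 = ((j:Nat):Int) := by omega
        have e3 : (j:Int)+1-3 = ((j-2:Nat):Int) := by omega
        have e4 : (j:Int)+1-4 = ((j-3:Nat):Int) := by omega
        have es : (j:Int)+1 = ((j+1:Nat):Int) := by omega
        rw [e1, e3, e4, es, PySem.List.pySetD_natCast]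
        simp only [PySem.List.pyGetD_natCast]
        rw [ihv j (by omega), ihv (j-2) (by omega), ihv (j-3) (by omega)]
      rw [hstep]
      have hrec : pvF (j+1) = pvF j + pvF (j-2) + pvF (j-3) := by
        obtain ⟨m, rfl⟩ : ∃ m, j = m + 3 := ⟨j - 3, by omega⟩
        show pvF (m+4) = _
        rw [pvF]
        congr 2
      constructor
      · simp [ihl]
      · intro k hk
        by_cases hke : k = j+1
        · subst hke
          rw [List.getD, List.getElem?_set_self (by omega), Option.getD_some, hrec]
        · rw [List.getD, List.getElem?_set_ne (by omega), ← List.getD]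
          exact ihv k (by omega)

theorem pvA_val (n : Int) (hn : 4 ≤ n) : count_ways_bottom_up n = pvF n.toNat := by
  rw [count_ways_bottom_up, if_neg (by omega), if_neg (by omega)]
  simp only []
  rw [show (fun (dp : Array Int) (i : Int) => dp.setIfInBounds i.toNat
        (dp.getD (i - 1).toNat 0 + dp.getD (i - 3).toNat 0 + dp.getD (i - 4).toNat 0)) = pvStepA
      from rfl]
  rw [pvArr_getD, pvFold_toList _ _ (fun i hi => (PySem.List.mem_pyRange_one.mp hi).1), pvInit_eq]
  have hv := (pvInv n hn n.toNat (by omega) (by omega)).2 n.toNat le_rfl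
  rwa [show ((n.toNat : Nat) : Int) = n from by omega] at hv

-- ===== VERDICT (by name: the statement is the Claim_ definition above) =====
theorem count_ways_bottom_up_spec : Claim_equal_count_ways_bottom_up := by
  intro n _
  unfold Spec_count_ways_bottom_up
  by_cases h2 : n ≤ 2
  · rw [count_ways_bottom_up, if_pos h2, count_ways_bottom_up_alt,
      if_pos (by omega), if_neg (by omega)]
  · by_cases h3 : n = 3
    · subst h3; rfl
    · rw [pvA_val n (by omega), pvB_val n (by omega)]
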